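-- pv_equiv track=rewrite | github.com/ChaseBP/echo-read | backend/app/api/narrate.py | coalesce_synthesis_segments
-- ===== SOURCE A (Python) =====
-- from typing import Any
--
-- def _is_speakable_text(text: str) -> bool:
--     return any(char.isalnum() for char in text)
--
-- def coalesce_synthesis_segments(segments: list[dict[str, Any]]) -> list[dict[str, Any]]:
--     """
--     ElevenLabs rejects inputs that become empty after stripping tags and symbols.
--     Fold punctuation-only / whitespace-only chunks into adjacent spoken chunks
--     so we keep the text flow without sending empty content to synthesis.
--     """
--
--     prepared: list[dict[str, Any]] = []
--     leading_buffer = ""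
--
--     for segment in segments:
--         text = segment["text"]
--
--         if _is_speakable_text(text):
--             next_segment = {**segment}
--             if leading_buffer:
--                 next_segment["text"] = f"{leading_buffer}{next_segment['text']}"
--                 leading_buffer = ""
--             prepared.append(next_segment)
--             continue
--
--         if prepared:
--             prepared[-1]["text"] += text
--         else:
--             leading_buffer += text
--
--     if leading_buffer and prepared:
--         prepared[0]["text"] = f"{leading_buffer}{prepared[0]['text']}"
--
--     return prepared
-- ===== SOURCE B (Python) =====
-- def _is_speakable_text(text: str) -> bool:
--     return any(char.isalnum() for char in text)
--
--
-- def coalesce_synthesis_segments(segments):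
--     # Right-to-left pass: accumulate trailing punctuation text into `pending`;
--     # each speakable segment absorbs the pending suffix and starts a group.
--     pending = ""
--     rev_groups = []
--     for segment in reversed(segments):
--         text = segment["text"]
--         if _is_speakable_text(text):
--             rev_groups.append((segment, text + pending))
--             pending = ""
--         else:
--             pending = text + pending
--     groups = rev_groups[::-1]
--     if not groups:
--         return []
--     # leftover `pending` is the text before the first speakable segment
--     first_anchor, first_text = groups[0]
--     return [{**first_anchor, "text": pending + first_text}] + \
--            [{**anchor, "text": text} for anchor, text in groups[1:]]
-- ===== Notes on version B (the rewrite author's own statement) =====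
-- stated objective: alternative
-- what changed: Replaces A's left-to-right fold that repeatedly mutates the last emitted dict and patches the first one afterwards with a single right-to-left pass that accumulates each group's text into (anchor, text) pairs and then emits one fresh copy per group.
import Mathlib
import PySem

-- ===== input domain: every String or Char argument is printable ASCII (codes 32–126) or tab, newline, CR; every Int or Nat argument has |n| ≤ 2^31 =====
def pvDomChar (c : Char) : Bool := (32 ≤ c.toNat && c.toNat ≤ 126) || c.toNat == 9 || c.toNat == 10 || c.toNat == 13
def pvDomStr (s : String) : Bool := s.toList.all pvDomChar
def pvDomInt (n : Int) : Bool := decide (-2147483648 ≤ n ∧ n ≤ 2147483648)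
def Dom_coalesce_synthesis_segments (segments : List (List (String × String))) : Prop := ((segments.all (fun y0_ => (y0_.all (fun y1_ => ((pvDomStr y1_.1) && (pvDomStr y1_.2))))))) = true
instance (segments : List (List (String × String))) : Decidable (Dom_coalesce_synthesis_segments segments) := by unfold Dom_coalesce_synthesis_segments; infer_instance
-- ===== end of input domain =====

-- B replaces A's left-to-right fold that mutates the last emitted dict with a single
-- right-to-left pass that builds (anchor, group-text) pairs back-to-front and then emits
-- each group's copy once (objective: alternative decomposition, same cost).
-- A mutates the dicts it appends to `prepared` in place; the equivalence here is about the
-- RETURN value (B builds fresh dicts and never mutates its input).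

-- Shared dict primitives on the association-list encoding of a Python dict (unique keys):
-- any(char.isalnum() for char in text) — Char.isAlphanum is exact on the ASCII domain Dom
def pvSpeakable (text : String) : Bool := text.toList.any (fun c => c.isAlphanum)
-- segment["text"]: first-match lookup; the KeyError case (lookup = none) is excluded by Pre_
def pvGetText (seg : List (String × String)) : String := (seg.lookup "text").getD ""
-- d["text"] = v on a Python dict: overwrite in place at the (unique) "text" key, append if absent
def pvSetText : List (String × String) → String → List (String × String)
  | [], v => [("text", v)]
  | (k, w) :: rest, v => if k = "text" then ("text", v) :: rest else (k, w) :: pvSetText rest v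

-- ===== PORT A =====
def pvStepA (st : List (List (String × String)) × String) (segment : List (String × String)) :
    List (List (String × String)) × String :=
  let prepared := st.1
  let leading_buffer := st.2
  let text := pvGetText segment
  if pvSpeakable text then
    -- next_segment = {**segment}: a fresh copy, value-equal to segment (dict keys are unique)
    let next_segment := segment
    let next_segment :=
      if leading_buffer ≠ "" then pvSetText next_segment (leading_buffer ++ pvGetText next_segment)
      else next_segment
    (prepared ++ [next_segment], "")
  else
    match prepared.getLast? with
    | some last => (prepared.dropLast ++ [pvSetText last (pvGetText last ++ text)], leading_buffer)
    | none => (prepared, leading_buffer ++ text)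

def coalesce_synthesis_segments (segments : List (List (String × String))) : List (List (String × String)) :=
  let st := segments.foldl pvStepA ([], "")
  let prepared := st.1
  let leading_buffer := st.2
  if leading_buffer ≠ "" then
    match prepared with
    | first :: rest => pvSetText first (leading_buffer ++ pvGetText first) :: rest
    | [] => []
  else prepared

-- ===== PORT B =====
def pvStepB (st : String × List (List (String × String) × String)) (segment : List (String × String)) :
    String × List (List (String × String) × String) :=
  let pending := st.1
  let rev_groups := st.2
  let text := pvGetText segment
  if pvSpeakable text then ("", rev_groups ++ [(segment, text ++ pending)])
  else (text ++ pending, rev_groups)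

def coalesce_synthesis_segments_alt (segments : List (List (String × String))) : List (List (String × String)) :=
  let st := segments.reverse.foldl pvStepB ("", [])   -- for segment in reversed(segments)
  let pending := st.1
  let rev_groups := st.2
  match rev_groups.reverse with                        -- groups = rev_groups[::-1]
  | [] => []
  | (first_anchor, first_text) :: rest =>
      -- [{**first_anchor, "text": pending + first_text}] + [{**anchor, "text": text} …]
      pvSetText first_anchor (pending ++ first_text) :: rest.map (fun p => pvSetText p.1 p.2)

-- ===== PRECONDITION & SPEC =====
-- Pre_ excludes exactly the inputs where A raises KeyError: a segment without a "text" key.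
def Pre_coalesce_synthesis_segments (segments : List (List (String × String))) : Prop :=
  ∀ seg ∈ segments, (seg.lookup "text").isSome = true
instance (segments : List (List (String × String))) : Decidable (Pre_coalesce_synthesis_segments segments) := by
  unfold Pre_coalesce_synthesis_segments; infer_instance

def pvWitness_coalesce_synthesis_segments : (List (List (String × String))) :=
  [[("text", "... ")], [("text", "Hello"), ("id", "1")], [("text", "!!")]]

def Spec_coalesce_synthesis_segments (segments : List (List (String × String))) (out : List (List (String × String))) : Prop := out = coalesce_synthesis_segments_alt segments
instance (segments : List (List (String × String))) (out : List (List (String × String))) : Decidable (Spec_coalesce_synthesis_segments segments out) := by unfold Spec_coalesce_synthesis_segments; infer_instance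

-- ===== CLAIM (what is proved, stated in full; the proofs are below) =====
def Claim_equal_coalesce_synthesis_segments : Prop := ∀ (segments : List (List (String × String))), Dom_coalesce_synthesis_segments segments → Pre_coalesce_synthesis_segments segments → Spec_coalesce_synthesis_segments segments (coalesce_synthesis_segments segments)

-- ===== LEMMAS AND PROOFS =====

-- The common shape both programs compute: (leading punctuation text, list of (anchor, group text)).
def pvGroups : List (List (String × String)) → String × List (List (String × String) × String)
  | [] => ("", [])
  | seg :: rest =>
    let pg := pvGroups rest
    let t := pvGetText seg
    if pvSpeakable t then ("", (seg, t ++ pg.1) :: pg.2) else (t ++ pg.1, pg.2)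

theorem pvGetText_setText (d : List (String × String)) (v : String) :
    pvGetText (pvSetText d v) = v := by
  induction d with
  | nil => rfl
  | cons p rest ih =>
    obtain ⟨k, w⟩ := p
    by_cases hk : k = "text"
    · subst hk; simp [pvSetText, pvGetText]
    · have hb : ("text" == k) = false := by simp [Ne.symm hk]
      simpa [pvSetText, hk, pvGetText, List.lookup, hb] using ih

theorem pvSetText_setText (d : List (String × String)) (v w : String) :
    pvSetText (pvSetText d w) v = pvSetText d v := by
  induction d with
  | nil => simp [pvSetText]
  | cons p rest ih =>
    obtain ⟨k, w'⟩ := p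
    by_cases hk : k = "text" <;> simp [pvSetText, hk, ih]

theorem pvSetText_getText (d : List (String × String)) (h : (d.lookup "text").isSome = true) :
    pvSetText d (pvGetText d) = d := by
  induction d with
  | nil => simp [List.lookup] at h
  | cons p rest ih =>
    obtain ⟨k, w⟩ := p
    by_cases hk : k = "text"
    · subst hk; simp [pvSetText, pvGetText]
    · have hb : ("text" == k) = false := by simp [Ne.symm hk]
      have h' : (rest.lookup "text").isSome = true := by
        simpa only [List.lookup, hb] using h
      have hget : pvGetText ((k, w) :: rest) = pvGetText rest := by
        simp only [pvGetText, List.lookup, hb]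
      rw [hget]
      simp only [pvSetText, if_neg hk]
      rw [ih h']

theorem pvSetText_hasText (d : List (String × String)) (v : String) :
    ((pvSetText d v).lookup "text").isSome = true := by
  induction d with
  | nil => simp [pvSetText]
  | cons p rest ih =>
    obtain ⟨k, w⟩ := p
    by_cases hk : k = "text"
    · subst hk; simp [pvSetText]
    · have hb : ("text" == k) = false := by simp [Ne.symm hk]
      simpa [pvSetText, hk, List.lookup, hb] using ih

-- A's loop once `prepared` is nonempty: the left recursion it performs.
def pvTail (d : List (String × String)) : List (List (String × String)) → List (List (String × String))
  | [] => [d]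
  | seg :: rest =>
    let t := pvGetText seg
    if pvSpeakable t then d :: pvTail seg rest
    else pvTail (pvSetText d (pvGetText d ++ t)) rest

theorem foldA_tail (rest : List (List (String × String)))
    (p : List (List (String × String))) (d : List (String × String)) :
    rest.foldl pvStepA (p ++ [d], "") = (p ++ pvTail d rest, "") := by
  induction rest generalizing p d with
  | nil => simp [pvTail]
  | cons seg rs ih =>
    by_cases hs : pvSpeakable (pvGetText seg)
    · have : pvStepA (p ++ [d], "") seg = ((p ++ [d]) ++ [seg], "") := by
        simp [pvStepA, hs]
      rw [List.foldl_cons, this, ih]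
      simp [pvTail, hs]
    · have : pvStepA (p ++ [d], "") seg =
          (p ++ [pvSetText d (pvGetText d ++ pvGetText seg)], "") := by
        simp [pvStepA, hs]
      rw [List.foldl_cons, this, ih]
      simp [pvTail, hs]

theorem pvTail_groups (segs : List (List (String × String))) (d : List (String × String))
    (hd : (d.lookup "text").isSome = true)
    (hall : ∀ s ∈ segs, (s.lookup "text").isSome = true) :
    pvTail d segs =
      pvSetText d (pvGetText d ++ (pvGroups segs).1) ::
        (pvGroups segs).2.map (fun q => pvSetText q.1 q.2) := by
  induction segs generalizing d with
  | nil =>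
    simp [pvTail, pvGroups, String.append_empty, pvSetText_getText d hd]
  | cons seg rs ih =>
    have hseg : (seg.lookup "text").isSome = true := hall seg (by simp)
    have hrs : ∀ s ∈ rs, (s.lookup "text").isSome = true :=
      fun s hs => hall s (List.mem_cons_of_mem _ hs)
    by_cases hs : pvSpeakable (pvGetText seg)
    · simp only [pvTail, pvGroups, hs, if_pos]
      rw [ih seg hseg hrs]
      simp [String.append_empty, pvSetText_getText d hd]
    · simp only [pvTail, pvGroups, hs, if_neg, Bool.false_eq_true, not_false_iff]
      rw [ih _ (pvSetText_hasText d _) hrs]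
      simp [pvGetText_setText, pvSetText_setText, String.append_assoc]

theorem foldA_groups (segs : List (List (String × String))) (buf : String)
    (hall : ∀ s ∈ segs, (s.lookup "text").isSome = true) :
    segs.foldl pvStepA ([], buf) =
      match pvGroups segs with
      | (p, []) => ([], buf ++ p)
      | (p, (a, t) :: gs) =>
          (pvSetText a (buf ++ p ++ t) :: gs.map (fun q => pvSetText q.1 q.2), "") := by
  induction segs generalizing buf with
  | nil => simp [pvGroups, String.append_empty]
  | cons seg rs ih =>
    have hseg : (seg.lookup "text").isSome = true := hall seg (by simp)
    have hrs : ∀ s ∈ rs, (s.lookup "text").isSome = true :=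
      fun s hs => hall s (List.mem_cons_of_mem _ hs)
    by_cases hs : pvSpeakable (pvGetText seg)
    · -- first speakable segment: enters the tail phase
      by_cases hb : buf = ""
      · have hstep : pvStepA ([], buf) seg = ([] ++ [seg], "") := by
          simp [pvStepA, hs, hb]
        rw [List.foldl_cons, hstep, foldA_tail rs [] seg,
            pvTail_groups rs seg hseg hrs]
        simp [pvGroups, hs, hb, String.empty_append]
      · have hstep : pvStepA ([], buf) seg =
            ([] ++ [pvSetText seg (buf ++ pvGetText seg)], "") := by
          simp [pvStepA, hs, hb]
        rw [List.foldl_cons, hstep, foldA_tail rs [] _,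
            pvTail_groups rs _ (pvSetText_hasText seg _) hrs]
        simp [pvGroups, hs, pvGetText_setText, pvSetText_setText,
          String.append_assoc, String.append_empty]
    · have hstep : pvStepA ([], buf) seg = ([], buf ++ pvGetText seg) := by
        simp [pvStepA, hs]
      rw [List.foldl_cons, hstep, ih _ hrs]
      cases hg : pvGroups rs with
      | mk p gs =>
        cases gs with
        | nil => simp [pvGroups, hs, hg, String.append_assoc]
        | cons g gs' =>
          obtain ⟨a, t⟩ := g
          simp [pvGroups, hs, hg, String.append_assoc]

-- B's reversed fold computes pvGroups with the group list reversed.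
theorem foldB_groups (segs : List (List (String × String))) :
    segs.reverse.foldl pvStepB ("", []) =
      ((pvGroups segs).1, (pvGroups segs).2.reverse) := by
  rw [List.foldl_reverse]
  induction segs with
  | nil => simp [pvGroups]
  | cons seg rs ih =>
    rw [List.foldr_cons, ih]
    by_cases hs : pvSpeakable (pvGetText seg) <;> simp [pvStepB, pvGroups, hs]

theorem alt_groups (segs : List (List (String × String))) :
    coalesce_synthesis_segments_alt segs =
      match pvGroups segs with
      | (_, []) => []
      | (p, (a, t) :: gs) =>
          pvSetText a (p ++ t) :: gs.map (fun q => pvSetText q.1 q.2) := by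
  unfold coalesce_synthesis_segments_alt
  rw [foldB_groups]
  cases hg : pvGroups segs with
  | mk p gs =>
    cases gs with
    | nil => simp
    | cons g gs' => obtain ⟨a, t⟩ := g; simp

-- ===== VERDICT (by name: the statement is the Claim_ definition above) =====
theorem coalesce_synthesis_segments_spec : Claim_equal_coalesce_synthesis_segments := by
  intro segments _hdom hpre
  unfold Spec_coalesce_synthesis_segments
  unfold coalesce_synthesis_segments
  rw [foldA_groups segments "" hpre, alt_groups segments]
  cases hg : pvGroups segments with
  | mk p gs =>
    cases gs with
    | nil => simp
    | cons g gs' =>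
      obtain ⟨a, t⟩ := g
      simp [String.empty_append]
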